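-- pv_equiv track=rewrite | github.com/YaNesyTortiK/AnimeParsers | src/anime_parsers_ru/parser_animego_async.py | _match_cvh_studio
-- ===== SOURCE A (Python) =====
-- def _match_cvh_studio(label: str, cvh_studios: list) -> str | None:
--     """
--     Fuzzy-сопоставление AnimeGO-лейбла с именем CVH voiceStudio.
--
--     Проход 1: точное совпадение (без учёта регистра)
--     Проход 2: одна строка является подстрокой другой
--               (напр. "AniLibria" ↔ "AnilibriaTV")
--
--     Возвращает точное имя CVH-студии или None если совпадение не найдено.
--     """
--     lo = label.lower()
--     # Проход 1: точное
--     for s in cvh_studios: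
--         if s.lower() == lo:
--             return s
--     # Проход 2: подстрока в любом направлении
--     for s in cvh_studios:
--         sl = s.lower()
--         if lo in sl or sl in lo:
--             return s
--     return None
-- ===== SOURCE B (Python) =====
-- def _match_cvh_studio(label: str, cvh_studios: list) -> str | None:
--     """Single pass: return exact case-insensitive match immediately;
--     remember the first bidirectional-substring match as a fallback."""
--     lo = label.lower()
--     candidate = None
--     for s in cvh_studios:
--         sl = s.lower()
--         if sl == lo:
--             return s
--         if candidate is None and (lo in sl or sl in lo):
--             candidate = s
--     return candidate
-- ===== Notes on version B (the rewrite author's own statement) =====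
-- stated objective: alternative
-- what changed: Replaces A's two sequential scans (exact pass, then substring pass) with a single traversal that returns on an exact match and threads a first-substring-candidate accumulator across iterations, returned after the loop.
import Mathlib
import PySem

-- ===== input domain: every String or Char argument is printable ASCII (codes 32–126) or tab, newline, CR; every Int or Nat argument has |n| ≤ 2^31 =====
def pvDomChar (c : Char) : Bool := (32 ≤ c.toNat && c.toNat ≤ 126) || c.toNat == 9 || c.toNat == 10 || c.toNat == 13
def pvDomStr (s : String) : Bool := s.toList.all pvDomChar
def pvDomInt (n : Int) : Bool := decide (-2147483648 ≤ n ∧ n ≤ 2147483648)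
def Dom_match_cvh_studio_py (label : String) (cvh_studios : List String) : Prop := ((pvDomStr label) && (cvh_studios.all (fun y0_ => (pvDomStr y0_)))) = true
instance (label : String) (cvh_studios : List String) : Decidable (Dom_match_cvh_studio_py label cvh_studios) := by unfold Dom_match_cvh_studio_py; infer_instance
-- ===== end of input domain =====

-- B replaces A's two sequential scans by a single pass threading a first-substring-candidate accumulator (objective: alternative decomposition; return values proved equal).


-- ===== PORT A =====
-- Pass 1: exact case-insensitive match
def pvA_pass1 (lo : String) : List String → Option String
  | [] => none
  | s :: rest => if PySem.Str.lower s = lo then some s else pvA_pass1 lo rest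

-- Pass 2: substring in either direction
def pvA_pass2 (lo : String) : List String → Option String
  | [] => none
  | s :: rest =>
    if PySem.Str.isIn lo (PySem.Str.lower s) || PySem.Str.isIn (PySem.Str.lower s) lo
    then some s else pvA_pass2 lo rest

def match_cvh_studio_py (label : String) (cvh_studios : List String) : Option String :=
  let lo := PySem.Str.lower label
  match pvA_pass1 lo cvh_studios with
  | some s => some s
  | none => pvA_pass2 lo cvh_studios

-- ===== PORT B =====
-- single loop threading the first-substring candidate (B's 'candidate' variable)
def pvB_loop (lo : String) (candidate : Option String) : List String → Option String
  | [] => candidate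
  | s :: rest =>
    if PySem.Str.lower s = lo then some s
    else
      pvB_loop lo
        (if candidate.isNone && (PySem.Str.isIn lo (PySem.Str.lower s) || PySem.Str.isIn (PySem.Str.lower s) lo)
         then some s else candidate) rest

def match_cvh_studio_py_alt (label : String) (cvh_studios : List String) : Option String :=
  pvB_loop (PySem.Str.lower label) none cvh_studios

-- ===== PRECONDITION & SPEC =====
def Spec_match_cvh_studio_py (label : String) (cvh_studios : List String) (out : Option String) : Prop := out = match_cvh_studio_py_alt label cvh_studios
instance (label : String) (cvh_studios : List String) (out : Option String) : Decidable (Spec_match_cvh_studio_py label cvh_studios out) := by unfold Spec_match_cvh_studio_py; infer_instance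

-- ===== CLAIM (what is proved, stated in full; the proofs are below) =====
def Claim_equal_match_cvh_studio_py : Prop := ∀ (label : String) (cvh_studios : List String), Dom_match_cvh_studio_py label cvh_studios → Spec_match_cvh_studio_py label cvh_studios (match_cvh_studio_py label cvh_studios)

-- ===== LEMMAS AND PROOFS =====

-- If pass 1 hits, B's loop returns the same hit no matter the candidate carried so far.
theorem pvB_loop_of_pass1 (lo : String) (xs : List String) (r : String)
    (h : pvA_pass1 lo xs = some r) (candidate : Option String) :
    pvB_loop lo candidate xs = some r := by
  induction xs generalizing candidate with
  | nil => simp [pvA_pass1] at h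
  | cons s rest ih =>
    by_cases he : PySem.Str.lower s = lo
    · rw [pvA_pass1, if_pos he] at h
      rw [pvB_loop, if_pos he]; exact h
    · rw [pvA_pass1, if_neg he] at h
      rw [pvB_loop, if_neg he]; exact ih h _

-- If pass 1 misses, B's loop returns the carried candidate if set, else pass 2's result.
theorem pvB_loop_of_no_pass1 (lo : String) (xs : List String)
    (h : pvA_pass1 lo xs = none) (candidate : Option String) :
    pvB_loop lo candidate xs = (match candidate with | some c => some c | none => pvA_pass2 lo xs) := by
  induction xs generalizing candidate with
  | nil => cases candidate <;> rfl
  | cons s rest ih =>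
    by_cases he : PySem.Str.lower s = lo
    · rw [pvA_pass1, if_pos he] at h; exact absurd h (by simp)
    · rw [pvA_pass1, if_neg he] at h
      rw [pvB_loop, if_neg he]
      cases candidate with
      | some c =>
        rw [show (Option.isNone (some c) && (PySem.Str.isIn lo (PySem.Str.lower s) || PySem.Str.isIn (PySem.Str.lower s) lo)) = false from rfl]
        rw [if_neg (by simp)]
        exact ih h (some c)
      | none =>
        rw [Option.isNone_none, Bool.true_and]
        by_cases hsub : (PySem.Str.isIn lo (PySem.Str.lower s) || PySem.Str.isIn (PySem.Str.lower s) lo) = true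
        · rw [if_pos hsub, ih h (some s), pvA_pass2, if_pos hsub]
        · rw [if_neg hsub, ih h none, pvA_pass2,
              if_neg hsub]

-- ===== VERDICT (by name: the statement is the Claim_ definition above) =====
theorem match_cvh_studio_py_spec : Claim_equal_match_cvh_studio_py := by
  intro label cvh_studios _
  show match_cvh_studio_py label cvh_studios = match_cvh_studio_py_alt label cvh_studios
  unfold match_cvh_studio_py match_cvh_studio_py_alt
  cases h : pvA_pass1 (PySem.Str.lower label) cvh_studios with
  | some r => simp only [h]; exact (pvB_loop_of_pass1 _ _ _ h none).symm
  | none => simp only [h]; exact (pvB_loop_of_no_pass1 _ _ h none).symm
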